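-- pv_equiv track=rewrite | github.com/echeadle/Py_Secret_Agent | 03_Chp/ch_3_ex_5.py | byte_sequence
-- ===== SOURCE A (Python) =====
-- def byte_sequence( bits ):
--     byte= []
--     for n, b in enumerate(bits):
--         if n%8 == 0 and n != 0:
--             yield to_byte(byte)
--             byte= []
--         byte.append( b )
--     yield to_byte(byte)
--
-- def to_byte( b ):
--     v= 0
--     for bit in b:
--         v = (v<<1)+bit
--     return v
-- ===== SOURCE B (Python) =====
-- def byte_sequence(bits):
--     v = 0
--     count = 0
--     for b in bits:
--         if count == 8:
--             yield v
--             v = 0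
--             count = 0
--         v = v * 2 + b
--         count += 1
--     yield v
-- ===== Notes on version B (the rewrite author's own statement) =====
-- stated objective: simpler
-- what changed: Replaces A's two-phase structure (accumulate each 8-bit chunk into a list, then re-scan it with the to_byte helper) by one fused streaming loop keeping a running byte value and a bit counter, eliminating the intermediate per-byte list and the helper's second pass (fewer allocations and one traversal of each bit).
import Mathlib
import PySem

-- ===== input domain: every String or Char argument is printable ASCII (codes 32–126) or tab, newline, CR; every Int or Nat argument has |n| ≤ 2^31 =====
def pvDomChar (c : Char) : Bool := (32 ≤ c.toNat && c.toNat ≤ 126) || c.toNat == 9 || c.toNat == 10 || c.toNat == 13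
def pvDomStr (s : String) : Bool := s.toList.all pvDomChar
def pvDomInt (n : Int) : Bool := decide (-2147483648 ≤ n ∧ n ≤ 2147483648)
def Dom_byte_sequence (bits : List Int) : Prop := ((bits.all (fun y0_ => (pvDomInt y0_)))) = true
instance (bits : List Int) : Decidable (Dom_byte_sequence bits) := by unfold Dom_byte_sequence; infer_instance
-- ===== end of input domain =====

-- B fuses A's two-phase loop (collect 8-bit chunks, re-scan each with to_byte) into one
-- streaming pass with a running value and bit counter: simpler, no intermediate list.

-- ===== PORT A =====
-- helper to_byte: v = (v<<1)+bit over the chunk (v<<1 = v*2 for Python ints)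
def to_byte (b : List Int) : Int := b.foldl (fun v bit => v * 2 + bit) 0

-- the generator's yields, collected in order: state = (byte, out)
def byte_sequence (bits : List Int) : List Int :=
  let s := (PySem.List.enumerate bits).foldl
    (fun (st : List Int × List Int) nb =>
      let st' := if nb.1 % 8 == 0 && nb.1 != 0 then ([], st.2 ++ [to_byte st.1]) else st
      (st'.1 ++ [nb.2], st'.2))
    ([], [])
  s.2 ++ [to_byte s.1]

-- ===== PORT B =====
-- single fused pass: state = (v, count, out)
def byte_sequence_alt (bits : List Int) : List Int :=
  let s := bits.foldl
    (fun (st : Int × Int × List Int) b =>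
      let st' := if st.2.1 == 8 then ((0 : Int), (0 : Int), st.2.2 ++ [st.1]) else st
      (st'.1 * 2 + b, st'.2.1 + 1, st'.2.2))
    (0, 0, [])
  s.2.2 ++ [s.1]

-- ===== PRECONDITION & SPEC =====
def Spec_byte_sequence (bits : List Int) (out : List Int) : Prop := out = byte_sequence_alt bits
instance (bits : List Int) (out : List Int) : Decidable (Spec_byte_sequence bits out) := by unfold Spec_byte_sequence; infer_instance

-- ===== CLAIM (what is proved, stated in full; the proofs are below) =====
def Claim_equal_byte_sequence : Prop := ∀ (bits : List Int), Dom_byte_sequence bits → Spec_byte_sequence bits (byte_sequence bits)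

-- ===== LEMMAS AND PROOFS =====

theorem to_byte_append (b : List Int) (x : Int) :
    to_byte (b ++ [x]) = to_byte b * 2 + x := by
  simp [to_byte, List.foldl_append]

-- both loops, run from related states, end in related states
theorem loop_eq (bits : List Int) (n : Int) (byte out : List Int) (v c : Int)
    (hv : v = to_byte byte) (hc : c = byte.length) (hn : 0 ≤ n)
    (h0 : n = 0 → c = 0) (hstep : n ≠ 0 → c = (n - 1) % 8 + 1) :
    (let s := (PySem.List.enumerate bits n).foldl
        (fun (st : List Int × List Int) nb =>
          let st' := if nb.1 % 8 == 0 && nb.1 != 0 then ([], st.2 ++ [to_byte st.1]) else st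
          (st'.1 ++ [nb.2], st'.2))
        (byte, out);
      s.2 ++ [to_byte s.1])
    =
    (let s := bits.foldl
        (fun (st : Int × Int × List Int) b =>
          let st' := if st.2.1 == 8 then ((0 : Int), (0 : Int), st.2.2 ++ [st.1]) else st
          (st'.1 * 2 + b, st'.2.1 + 1, st'.2.2))
        (v, c, out);
      s.2.2 ++ [s.1]) := by
  induction bits generalizing n byte out v c with
  | nil => simp [PySem.List.enumerate, hv]
  | cons b rest ih =>
    rw [PySem.List.enumerate_cons]
    simp only [List.foldl_cons]
    have hiff : c = 8 ↔ (n % 8 = 0 ∧ n ≠ 0) := by omega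
    by_cases hflush : c = 8
    · have hn8 : n % 8 = 0 ∧ n ≠ 0 := hiff.mp hflush
      have hcondA : (n % 8 == 0 && n != 0) = true := by simp [hn8.1, hn8.2]
      have hcondB : (c == 8) = true := by simp [hflush]
      rw [if_pos hcondA, if_pos hcondB]
      simp only [hv]
      exact ih (n + 1) [b] _ _ _ (by simp [to_byte]) (by simp) (by omega)
        (by omega) (by intro _; omega)
    · have hn8 : ¬ (n % 8 = 0 ∧ n ≠ 0) := fun h => hflush (hiff.mpr h)
      have hcondA : ¬ ((n % 8 == 0 && n != 0) = true) := by
        by_cases h1 : n % 8 = 0 <;> by_cases h2 : n = 0 <;> simp_all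
      have hcondB : ¬ ((c == 8) = true) := by simp [hflush]
      rw [if_neg hcondA, if_neg hcondB]
      exact ih (n + 1) (byte ++ [b]) _ _ _ (by rw [hv, to_byte_append])
        (by simp [hc]) (by omega) (by omega)
        (by intro _; show c + 1 = (n + 1 - 1) % 8 + 1; omega)

-- ===== VERDICT (by name: the statement is the Claim_ definition above) =====
theorem byte_sequence_spec : Claim_equal_byte_sequence := by
  intro bits _
  unfold Spec_byte_sequence byte_sequence byte_sequence_alt
  exact loop_eq bits 0 [] [] 0 0 rfl rfl le_rfl (fun _ => rfl) (by omega)
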